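-- pv_equiv track=rewrite | github.com/Steven-ZhangJM/CS263_Final_Project | solution/p173_3.py | count_laminae
-- ===== SOURCE A (Python) =====
-- def count_laminae(n):
--     if n == 0:
--         return 1
--     elif n < 2:
--         return 0
--     else:
--         laminaes = [0] * (n + 1)
--         laminaes[0] = 1
--         for i in range(1, n+1):
--             for j in range(i, 0, -1):
--                 laminaes[i] += laminaes[j-1]
--         return laminaes[n]
-- ===== SOURCE B (Python) =====
-- def count_laminae(n):
--     if n == 0:
--         return 1
--     if n < 2:
--         return 0
--     return 2 ** (n - 1)
-- ===== Notes on version B (the rewrite author's own statement) =====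
-- stated objective: faster
-- what changed: Replaced the quadratic nested cumulative-sum DP over an (n+1)-entry table by a closed-form power of two, since each new table entry equals the sum of all previous entries and therefore doubles the preceding one.
import Mathlib
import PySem

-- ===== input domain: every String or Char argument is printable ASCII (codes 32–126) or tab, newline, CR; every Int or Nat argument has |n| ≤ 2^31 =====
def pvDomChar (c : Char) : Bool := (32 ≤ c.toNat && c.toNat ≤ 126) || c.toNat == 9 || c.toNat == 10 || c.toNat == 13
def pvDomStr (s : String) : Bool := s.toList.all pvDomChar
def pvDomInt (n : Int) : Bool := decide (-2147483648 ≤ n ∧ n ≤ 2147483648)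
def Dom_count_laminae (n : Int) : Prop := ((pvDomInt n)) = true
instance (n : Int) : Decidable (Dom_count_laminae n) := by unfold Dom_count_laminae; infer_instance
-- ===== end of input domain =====

-- B replaces A's O(n^2) nested cumulative-sum DP by the closed form 2^(n-1) (objective: faster).

-- ===== PORT A =====
-- laminaes[i] += laminaes[j-1]; both indices are provably in range on every path, so
-- List.set at i.toNat together with pyGetD is exact here.
def pvInnerA (i : Int) (l : List Int) (j : Int) : List Int :=
  l.set i.toNat (PySem.List.pyGetD l i 0 + PySem.List.pyGetD l (j - 1) 0)

def count_laminae (n : Int) : Int :=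
  if n = 0 then 1
  else if n < 2 then 0
  else
    let laminaes0 := (List.replicate (n + 1).toNat 0).set 0 1
    let laminaes :=
      (PySem.List.pyRange 1 (n + 1) 1).foldl
        (fun l i => (PySem.List.pyRange i 0 (-1)).foldl (pvInnerA i) l) laminaes0
    PySem.List.pyGetD laminaes n 0

-- ===== PORT B =====
def count_laminae_alt (n : Int) : Int :=
  if n = 0 then 1
  else if n < 2 then 0
  else 2 ^ (n - 1).toNat

-- ===== PRECONDITION & SPEC =====
def Spec_count_laminae (n : Int) (out : Int) : Prop := out = count_laminae_alt n
instance (n : Int) (out : Int) : Decidable (Spec_count_laminae n out) := by unfold Spec_count_laminae; infer_instance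

-- ===== CLAIM (what is proved, stated in full; the proofs are below) =====
def Claim_equal_count_laminae : Prop := ∀ (n : Int), Dom_count_laminae n → Spec_count_laminae n (count_laminae n)

-- ===== LEMMAS AND PROOFS =====

-- the DP table after the first i outer iterations: entry 0 is 1, entries 1..i hold 2^(k-1), rest 0
def pvIdeal (m i : Nat) : List Int :=
  (List.range (m + 1)).map (fun k => if k = 0 then 1 else if k ≤ i then 2 ^ (k - 1) else 0)

theorem pvIdeal_length (m i : Nat) : (pvIdeal m i).length = m + 1 := by
  simp [pvIdeal]

theorem pvIdeal_getElem (m i k : Nat) (hk : k < m + 1) :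
    (pvIdeal m i)[k]'(by simp [pvIdeal_length, hk]) =
      (if k = 0 then 1 else if k ≤ i then 2 ^ (k - 1) else 0) := by
  simp [pvIdeal]

theorem pvIdeal_take_sum (m j : Nat) : ∀ i : Nat, i ≤ m + 1 → i ≤ j + 1 →
    ((pvIdeal m j).take i).sum = if i = 0 then 0 else 2 ^ (i - 1) := by
  intro i
  induction i with
  | zero => simp
  | succ i ih =>
    intro h1 h2
    have hi : i < (pvIdeal m j).length := by simp [pvIdeal_length]; omega
    rw [List.sum_take_succ _ _ hi, ih (by omega) (by omega), pvIdeal_getElem m j i (by omega)]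
    rcases Nat.eq_zero_or_pos i with h | h
    · subst h; simp
    · have : ¬ i = 0 := by omega
      have hij : i ≤ j := by omega
      simp only [this, if_false, hij, if_true, Nat.succ_ne_zero, Nat.add_sub_cancel]
      have h2 : (2 : Int) ^ i = 2 ^ (i - 1) * 2 := by
        rw [← pow_succ]
        congr 1
        omega
      rw [h2]
      generalize (2 : Int) ^ (i - 1) = a
      ring

-- the inner loop adds the sum of the first j entries to entry i (reads are all below i)
theorem pvInner_sum (i : Int) (hi0 : 0 ≤ i) :
    ∀ (j : Nat) (l : List Int), (j : Int) ≤ i → i.toNat < l.length →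
    (PySem.List.pyRange (j : Int) 0 (-1)).foldl (pvInnerA i) l =
      l.set i.toNat (PySem.List.pyGetD l i 0 + (l.take j).sum) := by
  intro j
  induction j with
  | zero =>
    intro l _ hlen
    rw [PySem.List.pyRange_neg_one_eq_nil (by omega)]
    simp only [List.foldl_nil, List.take_zero, List.sum_nil, add_zero]
    rw [PySem.List.pyGetD_eq_getElem _ _ hi0 (by omega)]
    exact (List.set_getElem_self hlen).symm
  | succ j ih =>
    intro l hji hlen
    rw [PySem.List.pyRange_neg_one_cons (by omega)]
    simp only [List.foldl_cons]
    have hji' : (j : Int) < i := by push_cast at hji ⊢; omega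
    have hjl : j < l.length := by omega
    have step : pvInnerA i l (((j + 1 : Nat) : Int)) =
        l.set i.toNat (PySem.List.pyGetD l i 0 + l[j]) := by
      unfold pvInnerA
      have h : (((j + 1 : Nat) : Int) - 1) = (j : Int) := by push_cast [Nat.cast_add]; ring
      rw [h, PySem.List.pyGetD_eq_getElem _ _ (by omega) (by omega)]
      simp [List.getElem?_eq_getElem hjl]
    have harg : (((j + 1 : Nat) : Int)) - 1 = (j : Int) := by push_cast [Nat.cast_add]; ring
    rw [harg]
    rw [step, ih _ (by omega) (by simpa using hlen)]
    have hne : j ≠ i.toNat := by omega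
    have htake : (l.set i.toNat (PySem.List.pyGetD l i 0 + l[j])).take j = l.take j := by
      apply List.ext_getElem
      · simp
      · intro k hk1 hk2
        simp only [List.getElem_take, List.getElem_set]
        have : ¬ i.toNat = k := by
          simp at hk1; omega
        simp [this]
    rw [htake]
    have hget : PySem.List.pyGetD (l.set i.toNat (PySem.List.pyGetD l i 0 + l[j])) i 0 =
        PySem.List.pyGetD l i 0 + l[j] := by
      rw [PySem.List.pyGetD_eq_getElem _ _ hi0 (by simp; omega)]
      simp
    rw [hget, List.set_set]
    congr 1
    rw [List.sum_take_succ _ _ hjl]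
    ring

-- one outer iteration turns table i-1 into table i
theorem pvOuter_step (m i : Nat) (hi : 1 ≤ i) (him : i ≤ m) :
    (PySem.List.pyRange ((i : Nat) : Int) 0 (-1)).foldl (pvInnerA (i : Int)) (pvIdeal m (i - 1)) =
      pvIdeal m i := by
  rw [pvInner_sum (i : Int) (by omega) i (pvIdeal m (i - 1)) (by omega)
      (by simp [pvIdeal_length]; omega)]
  have hget : PySem.List.pyGetD (pvIdeal m (i - 1)) (i : Int) 0 = 0 := by
    rw [PySem.List.pyGetD_eq_getElem _ _ (by omega) (by simp [pvIdeal_length]; omega)]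
    have : (i : Int).toNat = i := by omega
    rw [pvIdeal_getElem m (i - 1) ((i : Int).toNat) (by omega)]
    simp [this]
    omega
  have hsum : ((pvIdeal m (i - 1)).take i).sum = 2 ^ (i - 1) := by
    rw [pvIdeal_take_sum m (i - 1) i (by omega) (by omega)]
    simp; omega
  rw [hget, hsum]
  apply List.ext_getElem
  · simp [pvIdeal_length]
  · intro k hk1 hk2
    have hk : k < m + 1 := by simpa [pvIdeal_length] using hk2
    have hti : (i : Int).toNat = i := by omega
    rw [List.getElem_set]
    rw [pvIdeal_getElem m i k hk]
    by_cases hki : k = i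
    · subst hki
      simp [hti]
      omega
    · have : ¬ (i : Int).toNat = k := by omega
      simp only [this, if_false]
      rw [pvIdeal_getElem m (i - 1) k hk]
      by_cases hk0 : k = 0
      · simp [hk0]
      · have h1 : (k ≤ i - 1) = (k ≤ i) := by
          apply propext; constructor <;> intro <;> omega
        simp [hk0, h1]

-- the whole outer loop, run up to bound i, produces table i
theorem pvOuter_loop (m : Nat) : ∀ i : Nat, i ≤ m →
    (PySem.List.pyRange 1 ((i : Int) + 1) 1).foldl
        (fun l v => (PySem.List.pyRange v 0 (-1)).foldl (pvInnerA v) l) (pvIdeal m 0) =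
      pvIdeal m i := by
  intro i
  induction i with
  | zero => intro _; rw [PySem.List.pyRange_one_eq_nil (by omega)]; rfl
  | succ i ih =>
    intro h
    have hc : (((i + 1 : Nat) : Int) + 1) = ((i : Int) + 1) + 1 := by push_cast [Nat.cast_add]; ring
    rw [hc, PySem.List.pyRange_one_succ_right (by omega), List.foldl_append, ih (by omega)]
    simp only [List.foldl_cons, List.foldl_nil]
    have harg : ((i : Int) + 1) = (((i + 1 : Nat) : Int)) := by push_cast [Nat.cast_add]; ring
    rw [harg]
    simpa using pvOuter_step m (i + 1) (by omega) (by omega)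

theorem pvInit_eq (m : Nat) : (List.replicate (m + 1) (0 : Int)).set 0 1 = pvIdeal m 0 := by
  apply List.ext_getElem
  · simp [pvIdeal_length]
  · intro k hk1 hk2
    have hk : k < m + 1 := by simpa [pvIdeal_length] using hk2
    rw [List.getElem_set, pvIdeal_getElem m 0 k hk]
    by_cases h0 : k = 0 <;> simp [h0, Ne.symm]

-- ===== VERDICT (by name: the statement is the Claim_ definition above) =====
theorem count_laminae_spec : Claim_equal_count_laminae := by
  intro n _
  unfold Spec_count_laminae count_laminae count_laminae_alt
  by_cases h0 : n = 0
  · simp [h0]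
  · by_cases h1 : n < 2
    · simp [h0, h1]
    · simp only [h0, h1, if_false]
      have hn : 2 ≤ n := by omega
      set m := n.toNat with hm
      have hmn : (m : Int) = n := by omega
      have hm2 : 2 ≤ m := by omega
      have hrep : (n + 1).toNat = m + 1 := by omega
      rw [hrep, pvInit_eq m, ← hmn]
      rw [pvOuter_loop m m (le_refl m)]
      rw [PySem.List.pyGetD_eq_getElem _ _ (by omega) (by rw [pvIdeal_length]; push_cast; omega)]
      have htm : ((m : Int)).toNat = m := by omega
      rw [pvIdeal_getElem m m (((m : Int)).toNat) (by omega)]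
      have hne : ((m : Int)).toNat ≠ 0 := by omega
      simp only [htm]
      have : ¬ m = 0 := by omega
      simp only [this, if_false, le_refl, if_true]
      congr 1
      omega
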